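-- pv_equiv track=rewrite | github.com/Mercado-Financeiro/IC-Marcus | src/visualization/report_generator.py | _add_metrics_to_html
-- ===== SOURCE A (Python) =====
-- def _add_metrics_to_html(html: str) -> str:
--     """Add metrics to HTML template."""
--     # This would be populated with actual metrics from self.results
--     # For now, returning template
--     placeholders = {
--         '{quality_gates}': '<p>Quality gates evaluation pending...</p>',
--         '{discrimination_metrics}': '<p>Metrics pending...</p>',
--         '{calibration_metrics}': '<p>Metrics pending...</p>',
--         '{threshold_metrics}': '<p>Metrics pending...</p>',
--         '{temporal_metrics}': '<p>Metrics pending...</p>',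
--         '{optuna_metrics}': '<p>Metrics pending...</p>',
--         '{lstm_metrics}': '<p>Metrics pending...</p>',
--         '{backtest_metrics}': '<p>Metrics pending...</p>',
--         '{conclusion}': '<p>Model evaluation complete. Review metrics above for detailed performance assessment.</p>'
--     }
--
--     for placeholder, value in placeholders.items():
--         html = html.replace(placeholder, value)
--
--     return html
-- ===== SOURCE B (Python) =====
-- def _add_metrics_to_html(html: str) -> str:
--     """Add metrics to HTML template (single left-to-right scan)."""
--     placeholders = {
--         '{quality_gates}': '<p>Quality gates evaluation pending...</p>',
--         '{discrimination_metrics}': '<p>Metrics pending...</p>',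
--         '{calibration_metrics}': '<p>Metrics pending...</p>',
--         '{threshold_metrics}': '<p>Metrics pending...</p>',
--         '{temporal_metrics}': '<p>Metrics pending...</p>',
--         '{optuna_metrics}': '<p>Metrics pending...</p>',
--         '{lstm_metrics}': '<p>Metrics pending...</p>',
--         '{backtest_metrics}': '<p>Metrics pending...</p>',
--         '{conclusion}': '<p>Model evaluation complete. Review metrics above for detailed performance assessment.</p>'
--     }
--     out = []
--     i = 0
--     n = len(html)
--     while i < n:
--         c = html[i]
--         if c == '{':
--             for placeholder, value in placeholders.items():
--                 if html.startswith(placeholder, i):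
--                     out.append(value)
--                     i += len(placeholder)
--                     break
--             else:
--                 out.append(c)
--                 i += 1
--         else:
--             out.append(c)
--             i += 1
--     return ''.join(out)
-- ===== Notes on version B (the rewrite author's own statement) =====
-- stated objective: alternative
-- what changed: Replaced nine sequential whole-string str.replace passes with a single left-to-right scan that looks each candidate placeholder up in the table and emits its value, building the output once.
import Mathlib
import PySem

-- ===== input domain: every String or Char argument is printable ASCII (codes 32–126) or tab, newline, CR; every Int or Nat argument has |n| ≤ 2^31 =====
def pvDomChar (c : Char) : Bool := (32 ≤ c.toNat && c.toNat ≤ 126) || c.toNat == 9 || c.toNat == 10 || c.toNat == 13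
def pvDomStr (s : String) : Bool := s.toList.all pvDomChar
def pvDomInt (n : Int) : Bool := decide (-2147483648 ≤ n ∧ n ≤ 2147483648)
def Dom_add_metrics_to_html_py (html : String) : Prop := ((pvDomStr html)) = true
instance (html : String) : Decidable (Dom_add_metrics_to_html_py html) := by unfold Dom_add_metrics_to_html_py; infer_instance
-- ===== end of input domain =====

-- B replaces A's nine sequential whole-string replace passes by a single left-to-right scan
-- with a placeholder table (objective: alternative single-pass algorithm, same results).


-- ===== PORT A =====
-- the placeholders dict (literal, distinct keys) as an association list in insertion order
def pvPairsA : List (String × String) :=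
  [("{quality_gates}", "<p>Quality gates evaluation pending...</p>"),
   ("{discrimination_metrics}", "<p>Metrics pending...</p>"),
   ("{calibration_metrics}", "<p>Metrics pending...</p>"),
   ("{threshold_metrics}", "<p>Metrics pending...</p>"),
   ("{temporal_metrics}", "<p>Metrics pending...</p>"),
   ("{optuna_metrics}", "<p>Metrics pending...</p>"),
   ("{lstm_metrics}", "<p>Metrics pending...</p>"),
   ("{backtest_metrics}", "<p>Metrics pending...</p>"),
   ("{conclusion}", "<p>Model evaluation complete. Review metrics above for detailed performance assessment.</p>")]

-- for placeholder, value in placeholders.items(): html = html.replace(placeholder, value)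
def add_metrics_to_html_py (html : String) : String :=
  pvPairsA.foldl (fun h pv => PySem.Str.replace h pv.1 pv.2) html

-- ===== PORT B =====
-- B's placeholder table, on the List Char side (same nine literal pairs)
def pvPairsB : List (List Char × List Char) :=
  [("{quality_gates}".toList, "<p>Quality gates evaluation pending...</p>".toList),
   ("{discrimination_metrics}".toList, "<p>Metrics pending...</p>".toList),
   ("{calibration_metrics}".toList, "<p>Metrics pending...</p>".toList),
   ("{threshold_metrics}".toList, "<p>Metrics pending...</p>".toList),
   ("{temporal_metrics}".toList, "<p>Metrics pending...</p>".toList),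
   ("{optuna_metrics}".toList, "<p>Metrics pending...</p>".toList),
   ("{lstm_metrics}".toList, "<p>Metrics pending...</p>".toList),
   ("{backtest_metrics}".toList, "<p>Metrics pending...</p>".toList),
   ("{conclusion}".toList, "<p>Model evaluation complete. Review metrics above for detailed performance assessment.</p>".toList)]

-- needed by pvScanGo's termination: every placeholder key is nonempty
theorem pvPairsB_key_ne_nil : ∀ pv ∈ pvPairsB, pv.1 ≠ [] := by decide

-- the while loop of Source B: one pass; at '{' try the keys in table order (first match wins)
def pvScanGo : List Char → List Char
  | [] => []
  | c :: t =>
    if c = '{' then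
      match h : pvPairsB.find? (fun pv => pv.1.isPrefixOf (c :: t)) with
      | some pv => pv.2 ++ pvScanGo ((c :: t).drop pv.1.length)
      | none => c :: pvScanGo t
    else c :: pvScanGo t
termination_by l => l.length
decreasing_by
  · have hm := List.mem_of_find?_eq_some h
    have h1 : 0 < pv.1.length := List.length_pos_iff.mpr (pvPairsB_key_ne_nil _ hm)
    simp only [List.length_drop, List.length_cons]
    omega
  · simp
  · simp

def add_metrics_to_html_py_alt (html : String) : String :=
  String.ofList (pvScanGo html.toList)

-- ===== PRECONDITION & SPEC =====
def Spec_add_metrics_to_html_py (html : String) (out : String) : Prop := out = add_metrics_to_html_py_alt html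
instance (html : String) (out : String) : Decidable (Spec_add_metrics_to_html_py html out) := by unfold Spec_add_metrics_to_html_py; infer_instance

-- ===== CLAIM (what is proved, stated in full; the proofs are below) =====
def Claim_equal_add_metrics_to_html_py : Prop := ∀ (html : String), Dom_add_metrics_to_html_py html → Spec_add_metrics_to_html_py html (add_metrics_to_html_py html)

-- ===== LEMMAS AND PROOFS =====

-- clean recursion computing str.replace for a nonempty pattern k
def pvRep (k v : List Char) : List Char → List Char
  | [] => []
  | c :: t =>
    if k.isPrefixOf (c :: t) then v ++ pvRep k v (t.drop (k.length - 1))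
    else c :: pvRep k v t
termination_by l => l.length
decreasing_by
  · simp only [List.length_drop, List.length_cons]; omega
  · simp

theorem pvGo_eq (k v : List Char) (hk : k ≠ []) :
    ∀ fuel l acc, l.length ≤ fuel →
      PySem.Chars.replace.go k v fuel l acc = acc.reverse ++ pvRep k v l := by
  intro fuel
  induction fuel with
  | zero =>
    intro l acc h
    have hl : l = [] := List.eq_nil_of_length_eq_zero (Nat.le_zero.mp h)
    subst hl
    rw [PySem.Chars.replace.go, pvRep]
  | succ n ih =>
    intro l acc h
    match l with
    | [] =>
      rw [PySem.Chars.replace.go, pvRep]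
      · simp
      · omega
    | c :: t =>
      obtain ⟨m, hm⟩ : ∃ m, k.length = m + 1 := by
        cases k with
        | nil => exact absurd rfl hk
        | cons a b => exact ⟨b.length, rfl⟩
      rw [PySem.Chars.replace.go, pvRep]
      by_cases hp : k.isPrefixOf (c :: t)
      · rw [if_pos hp, if_pos hp]
        have hdrop : (c :: t).drop k.length = t.drop (k.length - 1) := by
          rw [hm]; simp
        rw [hdrop, ih _ _ (by simp at h ⊢; omega)]
        simp
      · rw [if_neg hp, if_neg hp]
        rw [ih _ _ (by simp at h ⊢; omega)]
        simp

theorem pvReplace_eq (k v l : List Char) (hk : k ≠ []) :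
    PySem.Chars.replace l k v = pvRep k v l := by
  unfold PySem.Chars.replace
  rw [if_neg (by simp [List.isEmpty_iff, hk]), pvGo_eq k v hk l.length l [] le_rfl]
  simp

theorem pvRep_cons_of_not_prefix {k : List Char} (v : List Char) {c : Char} {t : List Char}
    (h : ¬ k <+: (c :: t)) : pvRep k v (c :: t) = c :: pvRep k v t := by
  rw [pvRep, if_neg (by simpa [List.isPrefixOf_iff_prefix] using h)]

theorem pvRep_append_self {k : List Char} (v : List Char) (hk : k ≠ []) (w : List Char) :
    pvRep k v (k ++ w) = v ++ pvRep k v w := by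
  match k, hk with
  | a :: k', _ =>
    rw [List.cons_append, pvRep,
      if_pos (List.isPrefixOf_iff_prefix.mpr
        (List.cons_prefix_cons.mpr ⟨rfl, List.prefix_append k' w⟩))]
    simp

theorem pvRep_append_skip {k : List Char} (v : List Char) (u w : List Char)
    (h : ∀ m, m < u.length → ¬ k <+: (u.drop m ++ w)) :
    pvRep k v (u ++ w) = u ++ pvRep k v w := by
  induction u with
  | nil => simp
  | cons a u' ih =>
    rw [List.cons_append, pvRep_cons_of_not_prefix v (by simpa using h 0 (by simp))]
    rw [ih (fun m hm => by simpa using h (m + 1) (by simpa using hm))]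
    simp

theorem pvRep_prefix_reflect (k v : List Char) (hv : v.head? = some '<') :
    ∀ n x q, x.length ≤ n → '<' ∉ q → q <+: pvRep k v x → q <+: x := by
  intro n
  induction n with
  | zero =>
    intro x q hl hq h
    have hx : x = [] := List.eq_nil_of_length_eq_zero (Nat.le_zero.mp hl)
    subst hx
    rw [pvRep] at h
    simpa using h
  | succ n ih =>
    intro x q hl hq h
    match x with
    | [] =>
      rw [pvRep] at h
      simpa using h
    | c :: t =>
      match q with
      | [] => exact List.nil_prefix
      | d :: q' =>
        by_cases hp : k.isPrefixOf (c :: t)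
        · exfalso
          rw [pvRep, if_pos hp] at h
          cases v with
          | nil => simp at hv
          | cons a v' =>
            have ha : a = '<' := by simpa using hv
            have : d = a := (List.cons_prefix_cons.mp h).1
            exact hq (by rw [this, ha]; exact List.mem_cons_self)
        · rw [pvRep, if_neg hp] at h
          obtain ⟨hd, hq'⟩ := List.cons_prefix_cons.mp h
          have : q' <+: t :=
            ih t q' (by simp at hl; omega) (fun hm => hq (List.mem_cons_of_mem _ hm)) hq'
          exact List.cons_prefix_cons.mpr ⟨hd, this⟩

def pvGood (p : List Char × List Char) : Prop :=
  p.1 ≠ [] ∧ p.1.head? = some '{' ∧ '{' ∉ p.1.tail ∧ '<' ∉ p.1 ∧ p.2.head? = some '<' ∧ '{' ∉ p.2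

theorem pvGood_all : ∀ p ∈ pvPairsB, pvGood p := by unfold pvGood; decide

-- the keys are mutually prefix-free
theorem pvPF : ∀ p ∈ pvPairsB, ∀ q ∈ pvPairsB, p.1 = q.1 ∨ ¬ p.1 <+: q.1 := by decide

theorem pvNot_prefix_of_head_ne {k w : List Char} (hk : k.head? = some '{')
    (hw : w.head? ≠ some '{') : ¬ k <+: w := by
  intro h
  cases k with
  | nil => simp at hk
  | cons a k' =>
    have ha : a = '{' := by simpa using hk
    cases w with
    | nil => simp at h
    | cons b w' =>
      have : a = b := (List.cons_prefix_cons.mp h).1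
      exact hw (by simp [← this, ha])

theorem pvFold_nil : ∀ Q : List (List Char × List Char),
    Q.foldl (fun l p => pvRep p.1 p.2 l) [] = [] := by
  intro Q
  induction Q with
  | nil => rfl
  | cons p Q' ih => simpa [pvRep] using ih

theorem pvFold_cons (c : Char) :
    ∀ (Q : List (List Char × List Char)), (∀ p ∈ Q, pvGood p) →
      ∀ t, (∀ p ∈ Q, ¬ p.1 <+: (c :: t)) →
      Q.foldl (fun l p => pvRep p.1 p.2 l) (c :: t)
        = c :: Q.foldl (fun l p => pvRep p.1 p.2 l) t := by
  intro Q
  induction Q with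
  | nil => intro _ t _; rfl
  | cons p Q' ih =>
    intro hG t hnp
    simp only [List.foldl_cons]
    rw [pvRep_cons_of_not_prefix p.2 (hnp p List.mem_cons_self)]
    apply ih (fun p' hp' => hG p' (List.mem_cons_of_mem _ hp'))
    intro p' hp'
    obtain ⟨g1, g2, g3, g4, g5, g6⟩ := hG p' (List.mem_cons_of_mem _ hp')
    obtain ⟨f1, f2, f3, f4, f5, f6⟩ := hG p List.mem_cons_self
    have hnp' := hnp p' (List.mem_cons_of_mem _ hp')
    intro habs
    cases hk1 : p'.1 with
    | nil => exact g1 hk1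
    | cons a q =>
      have ha : a = '{' := by rw [hk1] at g2; simpa using g2
      rw [hk1] at habs
      obtain ⟨hac, hq⟩ := List.cons_prefix_cons.mp habs
      have hlt : '<' ∉ q := by
        intro hmem
        exact g4 (by rw [hk1]; exact List.mem_cons_of_mem _ hmem)
      have hqt : q <+: t :=
        pvRep_prefix_reflect p.1 p.2 f5 t.length t q le_rfl hlt hq
      exact hnp' (by rw [hk1, hac]; exact List.cons_prefix_cons.mpr ⟨rfl, hqt⟩)

theorem pvSkip_premise {p₁ : List Char} (hp : p₁.head? = some '{') (u t : List Char)
    (h0 : ¬ p₁ <+: u ++ t) (hmid : ∀ m, 0 < m → (hm : m < u.length) → u[m] ≠ '{') :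
    ∀ m, m < u.length → ¬ p₁ <+: (u.drop m ++ t) := by
  intro m hm
  cases m with
  | zero => simpa using h0
  | succ m' =>
    have hdrop : u.drop (m' + 1) = u[m' + 1] :: u.drop (m' + 2) := List.drop_eq_getElem_cons hm
    rw [hdrop]
    exact pvNot_prefix_of_head_ne hp (by
      simp only [List.cons_append, List.head?_cons, ne_eq, Option.some.injEq]
      exact hmid (m' + 1) (Nat.succ_pos m') hm)

theorem pvFold_key_block (k : List Char) (_hk1 : k.head? = some '{') (hk2 : '{' ∉ k.tail) :
    ∀ Q : List (List Char × List Char), (∀ p ∈ Q, pvGood p) → (∀ p ∈ Q, ¬ p.1 <+: k ∧ ¬ k <+: p.1) →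
    ∀ t, Q.foldl (fun l p => pvRep p.1 p.2 l) (k ++ t)
        = k ++ Q.foldl (fun l p => pvRep p.1 p.2 l) t := by
  intro Q
  induction Q with
  | nil => intro _ _ t; rfl
  | cons p Q' ih =>
    intro hG hpf t
    simp only [List.foldl_cons]
    obtain ⟨g1, g2, g3, g4, g5, g6⟩ := hG p List.mem_cons_self
    obtain ⟨hnpk, hnkp⟩ := hpf p List.mem_cons_self
    have hstep : pvRep p.1 p.2 (k ++ t) = k ++ pvRep p.1 p.2 t := by
      apply pvRep_append_skip
      apply pvSkip_premise g2
      · intro habs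
        rcases List.prefix_or_prefix_of_prefix habs (List.prefix_append k t) with h1 | h2
        · exact hnpk h1
        · exact hnkp h2
      · intro m hm0 hm habs
        apply hk2
        have hmem := List.getElem_mem (l := k.drop 1) (n := m - 1)
          (h := by rw [List.length_drop]; omega)
        rw [List.getElem_drop] at hmem
        simp only [show 1 + (m - 1) = m from by omega] at hmem
        rw [← habs, ← List.drop_one]
        exact hmem
    rw [hstep]
    exact ih (fun p' h => hG p' (List.mem_cons_of_mem _ h))
      (fun p' h => hpf p' (List.mem_cons_of_mem _ h)) _

theorem pvFold_val_block (u : List Char) (hu0 : u.head? = some '<') (hu : '{' ∉ u) :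
    ∀ Q : List (List Char × List Char), (∀ p ∈ Q, pvGood p) →
    ∀ t, Q.foldl (fun l p => pvRep p.1 p.2 l) (u ++ t)
        = u ++ Q.foldl (fun l p => pvRep p.1 p.2 l) t := by
  intro Q
  induction Q with
  | nil => intro _ t; rfl
  | cons p Q' ih =>
    intro hG t
    simp only [List.foldl_cons]
    obtain ⟨g1, g2, g3, g4, g5, g6⟩ := hG p List.mem_cons_self
    have hstep : pvRep p.1 p.2 (u ++ t) = u ++ pvRep p.1 p.2 t := by
      apply pvRep_append_skip
      apply pvSkip_premise g2
      · apply pvNot_prefix_of_head_ne g2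
        cases u with
        | nil => simp at hu0
        | cons a u' =>
          have : a = '<' := by simpa using hu0
          simp [this]
      · intro m hm0 hm habs
        exact hu (by rw [← habs]; exact List.getElem_mem hm)
    rw [hstep]
    exact ih (fun p' h => hG p' (List.mem_cons_of_mem _ h)) _

theorem pvMain : ∀ n l, l.length ≤ n →
    pvPairsB.foldl (fun l p => pvRep p.1 p.2 l) l = pvScanGo l := by
  intro n
  induction n with
  | zero =>
    intro l h
    have hl : l = [] := List.eq_nil_of_length_eq_zero (Nat.le_zero.mp h)
    subst hl
    rw [pvFold_nil, pvScanGo]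
  | succ n ih =>
    intro l hl
    match l with
    | [] => rw [pvFold_nil, pvScanGo]
    | c :: t =>
      have htn : t.length ≤ n := by simp only [List.length_cons] at hl; omega
      by_cases hc : c = '{'
      · subst hc
        rcases hfind : pvPairsB.find? (fun pv => pv.1.isPrefixOf ('{' :: t)) with _ | pv
        · have hall : ∀ p ∈ pvPairsB, ¬ p.1 <+: ('{' :: t) := by
            intro p hp
            simpa [List.isPrefixOf_iff_prefix] using List.find?_eq_none.mp hfind p hp
          rw [pvFold_cons '{' pvPairsB pvGood_all t hall, ih t htn]
          rw [pvScanGo, if_pos rfl]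
          split
          next a b => exact absurd (hfind ▸ b) (by simp)
          next a => rfl
        · obtain ⟨hp, P₁, P₂, hsplit, hbefore⟩ := List.find?_eq_some_iff_append.mp hfind
          have hpre : pv.1 <+: '{' :: t := List.isPrefixOf_iff_prefix.mp hp
          obtain ⟨t', ht'⟩ := hpre
          have hpvmem : pv ∈ pvPairsB := List.mem_of_find?_eq_some hfind
          obtain ⟨g1, g2, g3, g4, g5, g6⟩ := pvGood_all pv hpvmem
          have hG1 : ∀ p ∈ P₁, pvGood p := fun p h =>
            pvGood_all p (by rw [hsplit]; exact List.mem_append_left _ h)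
          have hG2 : ∀ p ∈ P₂, pvGood p := fun p h =>
            pvGood_all p (by rw [hsplit]; exact List.mem_append_right _ (List.mem_cons_of_mem _ h))
          have hpvpre : pv.1 <+: '{' :: t := ⟨t', ht'⟩
          have hpf : ∀ p ∈ P₁, ¬ p.1 <+: pv.1 ∧ ¬ pv.1 <+: p.1 := by
            intro p hmem
            have hmemB : p ∈ pvPairsB := by rw [hsplit]; exact List.mem_append_left _ hmem
            have hnot : ¬ p.1 <+: ('{' :: t) := by
              have hb := hbefore p hmem
              simp only [Bool.not_eq_eq_eq_not, Bool.not_true] at hb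
              rw [← List.isPrefixOf_iff_prefix, hb]
              simp
            refine ⟨fun habs => hnot (habs.trans hpvpre), fun habs => ?_⟩
            rcases pvPF pv hpvmem p hmemB with heq | hnp
            · exact hnot (heq ▸ hpvpre)
            · exact hnp habs
          have ht'len : t'.length ≤ n := by
            have := congrArg List.length ht'
            have hkpos : 0 < pv.1.length := List.length_pos_iff.mpr g1
            simp only [List.length_append, List.length_cons] at this
            omega
          have hdrop : ('{' :: t).drop pv.1.length = t' := by
            rw [← ht', List.drop_left]
          calc pvPairsB.foldl (fun l p => pvRep p.1 p.2 l) ('{' :: t)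
              = (P₁ ++ pv :: P₂).foldl (fun l p => pvRep p.1 p.2 l) (pv.1 ++ t') := by
                rw [← hsplit, ht']
            _ = (pv :: P₂).foldl (fun l p => pvRep p.1 p.2 l)
                  (P₁.foldl (fun l p => pvRep p.1 p.2 l) (pv.1 ++ t')) := by
                rw [List.foldl_append]
            _ = (pv :: P₂).foldl (fun l p => pvRep p.1 p.2 l)
                  (pv.1 ++ P₁.foldl (fun l p => pvRep p.1 p.2 l) t') := by
                rw [pvFold_key_block pv.1 g2 g3 P₁ hG1 hpf t']
            _ = P₂.foldl (fun l p => pvRep p.1 p.2 l)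
                  (pvRep pv.1 pv.2 (pv.1 ++ P₁.foldl (fun l p => pvRep p.1 p.2 l) t')) := rfl
            _ = P₂.foldl (fun l p => pvRep p.1 p.2 l)
                  (pv.2 ++ pvRep pv.1 pv.2 (P₁.foldl (fun l p => pvRep p.1 p.2 l) t')) := by
                rw [pvRep_append_self pv.2 g1]
            _ = pv.2 ++ P₂.foldl (fun l p => pvRep p.1 p.2 l)
                  (pvRep pv.1 pv.2 (P₁.foldl (fun l p => pvRep p.1 p.2 l) t')) := by
                rw [pvFold_val_block pv.2 g5 g6 P₂ hG2]
            _ = pv.2 ++ pvPairsB.foldl (fun l p => pvRep p.1 p.2 l) t' := by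
                rw [hsplit, List.foldl_append]
                rfl
            _ = pv.2 ++ pvScanGo t' := by rw [ih t' ht'len]
            _ = pvScanGo ('{' :: t) := by
                rw [pvScanGo, if_pos rfl]
                split
                next a b =>
                  rw [hfind] at b
                  cases b
                  rw [hdrop]
                next a => rw [hfind] at a; exact absurd a (by simp)
      · have hall : ∀ p ∈ pvPairsB, ¬ p.1 <+: (c :: t) := by
          intro p hp
          obtain ⟨g1, g2, g3, g4, g5, g6⟩ := pvGood_all p hp
          exact pvNot_prefix_of_head_ne g2 (by simpa using hc)
        rw [pvFold_cons c pvPairsB pvGood_all t hall, ih t htn]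
        rw [pvScanGo]
        simp [hc]

theorem pvFoldStr (ps : List (String × String)) (s : String) :
    (ps.foldl (fun h pv => PySem.Str.replace h pv.1 pv.2) s).toList
      = (ps.map (fun pv => (pv.1.toList, pv.2.toList))).foldl
          (fun l pv => PySem.Chars.replace l pv.1 pv.2) s.toList := by
  induction ps generalizing s with
  | nil => rfl
  | cons p ps ih =>
    simp only [List.map_cons, List.foldl_cons]
    rw [ih, PySem.Str.replace, String.toList_ofList]

theorem pvFoldRep_eq (Q : List (List Char × List Char)) (hQ : ∀ p ∈ Q, p.1 ≠ []) :
    ∀ l, Q.foldl (fun l p => PySem.Chars.replace l p.1 p.2) l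
      = Q.foldl (fun l p => pvRep p.1 p.2 l) l := by
  induction Q with
  | nil => intro l; rfl
  | cons p Q' ih =>
    intro l
    simp only [List.foldl_cons]
    rw [pvReplace_eq _ _ _ (hQ p List.mem_cons_self)]
    exact ih (fun p' h => hQ p' (List.mem_cons_of_mem _ h)) _

-- ===== VERDICT (by name: the statement is the Claim_ definition above) =====
theorem add_metrics_to_html_py_spec : Claim_equal_add_metrics_to_html_py := by
  intro html _
  show add_metrics_to_html_py html = add_metrics_to_html_py_alt html
  have hmap : pvPairsA.map (fun pv => (pv.1.toList, pv.2.toList)) = pvPairsB := rfl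
  have h1 : (add_metrics_to_html_py html).toList = pvScanGo html.toList := by
    rw [add_metrics_to_html_py, pvFoldStr, hmap,
      pvFoldRep_eq pvPairsB pvPairsB_key_ne_nil,
      pvMain html.toList.length html.toList le_rfl]
  rw [add_metrics_to_html_py_alt, ← h1, String.ofList_toList]
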